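-- pv_equiv track=rewrite | github.com/pypi-data/pypi-mirror-6 | packages/rfZenHan/rfZenHan-0.4.zip/rfZenHan-0.4/rfZenHan.py | marge_types
-- ===== SOURCE A (Python) =====
-- def marge_types(types):
-- 	(mfr, mto, mdes) = ([], [], [])
-- 	for type in types:
-- 		(fr, to, des) = type
-- 		mfr  += fr
-- 		mto  += to
-- 		mdes += des
-- 	return (mfr, mto, mdes)
-- ===== SOURCE B (Python) =====
-- def marge_types(types):
-- 	rows = list(types)
-- 	def merge(lo, hi):
-- 		if lo >= hi:
-- 			return ([], [], [])
-- 		if hi - lo == 1: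
-- 			(fr, to, des) = rows[lo]
-- 			return (list(fr), list(to), list(des))
-- 		mid = (lo + hi) // 2
-- 		(lf, lt, ld) = merge(lo, mid)
-- 		(rf, rt, rd) = merge(mid, hi)
-- 		return (lf + rf, lt + rt, ld + rd)
-- 	return merge(0, len(rows))
-- ===== Notes on version B (the rewrite author's own statement) =====
-- stated objective: alternative
-- what changed: Replaces A's single left-to-right accumulator loop with a recursive divide-and-conquer merge that splits the row list in half, merges each half recursively, and concatenates the three component lists of the two halves.
import Mathlib
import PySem

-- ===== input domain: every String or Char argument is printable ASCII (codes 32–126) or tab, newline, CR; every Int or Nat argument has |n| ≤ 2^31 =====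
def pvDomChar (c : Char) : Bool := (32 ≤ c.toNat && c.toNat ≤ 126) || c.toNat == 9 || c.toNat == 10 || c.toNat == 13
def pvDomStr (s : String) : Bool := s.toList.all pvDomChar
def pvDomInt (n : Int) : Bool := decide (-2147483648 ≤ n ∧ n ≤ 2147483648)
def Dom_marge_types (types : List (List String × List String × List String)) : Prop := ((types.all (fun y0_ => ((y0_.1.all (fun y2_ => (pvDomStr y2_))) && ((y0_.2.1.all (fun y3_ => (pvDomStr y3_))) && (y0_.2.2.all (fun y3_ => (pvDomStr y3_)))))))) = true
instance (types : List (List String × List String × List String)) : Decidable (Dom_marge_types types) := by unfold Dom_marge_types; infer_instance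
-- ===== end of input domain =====

-- B replaces A's single left-to-right accumulator loop with a recursive divide-and-conquer
-- merge over the row list; an alternative decomposition, proved equal everywhere.

-- ===== PORT A =====
def marge_types (types : List (List String × List String × List String)) : List String × List String × List String :=
  types.foldl (fun acc t =>
    let (mfr, mto, mdes) := acc
    let (fr, to_, des) := t
    (mfr ++ fr, mto ++ to_, mdes ++ des)) ([], [], [])

-- ===== PORT B =====
-- Source B's inner merge(lo, hi) works on the slice rows[lo:hi]; here that slice is the argument,
-- split at mid = len/2 exactly as the Python splits its index range.
def mergeDC (rows : List (List String × List String × List String)) :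
    List String × List String × List String :=
  match rows with
  | [] => ([], [], [])
  | [t] => (t.1, t.2.1, t.2.2)
  | x :: y :: rest =>
    let l := x :: y :: rest
    let mid := l.length / 2
    let L := mergeDC (l.take mid)
    let R := mergeDC (l.drop mid)
    (L.1 ++ R.1, L.2.1 ++ R.2.1, L.2.2 ++ R.2.2)
termination_by rows.length
decreasing_by
  · simp; omega
  · simp; omega

def marge_types_alt (types : List (List String × List String × List String)) : List String × List String × List String :=
  mergeDC types

-- ===== PRECONDITION & SPEC =====
def Spec_marge_types (types : List (List String × List String × List String)) (out : List String × List String × List String) : Prop := out = marge_types_alt types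
instance (types : List (List String × List String × List String)) (out : List String × List String × List String) : Decidable (Spec_marge_types types out) := by unfold Spec_marge_types; infer_instance

-- ===== CLAIM (what is proved, stated in full; the proofs are below) =====
def Claim_equal_marge_types : Prop := ∀ (types : List (List String × List String × List String)), Dom_marge_types types → Spec_marge_types types (marge_types types)

-- ===== LEMMAS AND PROOFS =====
theorem marge_types_foldl_acc (types : List (List String × List String × List String))
    (a b c : List String) :
    types.foldl (fun acc t =>
      let (mfr, mto, mdes) := acc
      let (fr, to_, des) := t
      (mfr ++ fr, mto ++ to_, mdes ++ des)) (a, b, c)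
    = (a ++ types.flatMap (fun t => t.1), b ++ types.flatMap (fun t => t.2.1),
       c ++ types.flatMap (fun t => t.2.2)) := by
  induction types generalizing a b c with
  | nil => simp
  | cons h t ih => simp [List.foldl, ih]

theorem mergeDC_eq_flat (rows : List (List String × List String × List String)) :
    mergeDC rows
    = (rows.flatMap (fun t => t.1), rows.flatMap (fun t => t.2.1),
       rows.flatMap (fun t => t.2.2)) := by
  induction rows using mergeDC.induct with
  | case1 => simp [mergeDC]
  | case2 t => simp [mergeDC]
  | case3 x y rest l mid ih1 ih2 =>
    simp only [mergeDC]
    rw [ih1, ih2, ← List.flatMap_append, ← List.flatMap_append, ← List.flatMap_append,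
        List.take_append_drop]

-- ===== VERDICT (by name: the statement is the Claim_ definition above) =====
theorem marge_types_spec : Claim_equal_marge_types := by
  intro types _
  unfold Spec_marge_types marge_types marge_types_alt
  rw [mergeDC_eq_flat]
  simpa using marge_types_foldl_acc types [] [] []
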